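-- pv_equiv track=rewrite | github.com/alonravid1/Rosalind-Project | find_consensus.py | concensus
-- ===== SOURCE A (Python) =====
-- def concensus(strands):
--     #receives a list of DNA strands of equal length,
--     #returns a concensus strand and
--     nuc=[]
--     for i in range(len(strands[0])):
--         nuc.append({'A':0,'C':0,'G':0,'T':0})
--         for strand in strands:
--             if(strand[i]=='A'):
--                 nuc[i]['A']+=1
--             elif(strand[i]=='C'):
--                  nuc[i]['C']+=1
--             elif(strand[i]=='G'):
--                  nuc[i]['G']+=1
--             elif(strand[i]=='T'):
--                  nuc[i]['T']+=1
--     constrand=""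
--     for base in range(len(nuc)):
--         if(nuc[base]['A']>nuc[base]['C']):
--             temp1='A'
--         else:
--             temp1='C'
--         if(nuc[base]['G']>nuc[base]['T']):
--             temp2='G'
--         else:
--             temp2='T'
--         if(nuc[base][temp1]>nuc[base][temp2]):
--             constrand+=temp1
--         else:
--             constrand+=temp2
--     return(constrand)
-- ===== SOURCE B (Python) =====
-- def concensus(strands):
--     # Sort each column and scan its runs: the consensus base is the base of the
--     # longest run of A/C/G/T; ties (including the empty column) resolve toward
--     # the later base in A<C<G<T order.
--     out = []
--     for i in range(len(strands[0])):
--         column = sorted(s[i] for s in strands if s[i] in 'ACGT')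
--         best, best_len, prev, run = 'T', 0, None, 0
--         for ch in column:
--             run = run + 1 if ch == prev else 1
--             prev = ch
--             if run >= best_len:
--                 best, best_len = ch, run
--         out.append(best)
--     return ''.join(out)
-- ===== Notes on version B (the rewrite author's own statement) =====
-- stated objective: alternative
-- what changed: B sorts each column and scans its runs to find the longest run of A/C/G/T (ties toward the later base), instead of A's per-position dict of four counters combined by a three-comparison tournament.
import Mathlib
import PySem

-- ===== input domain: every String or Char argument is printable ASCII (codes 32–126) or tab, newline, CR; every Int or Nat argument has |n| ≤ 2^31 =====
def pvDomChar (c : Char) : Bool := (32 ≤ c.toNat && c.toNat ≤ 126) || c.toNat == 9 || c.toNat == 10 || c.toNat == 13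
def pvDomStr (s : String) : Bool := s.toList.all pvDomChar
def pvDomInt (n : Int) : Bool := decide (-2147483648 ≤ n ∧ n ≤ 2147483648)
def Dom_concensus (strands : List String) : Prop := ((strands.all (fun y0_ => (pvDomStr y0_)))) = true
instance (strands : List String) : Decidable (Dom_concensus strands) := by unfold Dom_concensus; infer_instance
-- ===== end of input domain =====

-- B replaces A's dict-of-counts-plus-comparison-tournament by a different algorithm
-- of the same cost class: sort each column and scan its runs, keeping the longest run.

-- ===== PORT A =====
-- per-strand step of A's inner loop at column i ('strand[i]' raises IndexError in
-- Python when i is out of range; those inputs are excluded by Pre_, here the step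
-- leaves d unchanged)
def pvAStep (i : Nat) (d : PySem.Dict Char Int) (strand : String) : PySem.Dict Char Int :=
  match strand.toList[i]? with
  | none => d
  | some c =>
    if c = 'A' then d.modify 'A' 0 (· + 1)
    else if c = 'C' then d.modify 'C' 0 (· + 1)
    else if c = 'G' then d.modify 'G' 0 (· + 1)
    else if c = 'T' then d.modify 'T' 0 (· + 1)
    else d

-- the dict nuc[i] after A's inner loop over all strands
def pvACount (strands : List String) (i : Nat) : PySem.Dict Char Int :=
  strands.foldl (pvAStep i) (PySem.Dict.mk [('A', 0), ('C', 0), ('G', 0), ('T', 0)])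

-- A's second loop body: the two if/else tournaments and the final comparison
def pvAPick (d : PySem.Dict Char Int) : Char :=
  let t1 : Char := if d.getD 'A' 0 > d.getD 'C' 0 then 'A' else 'C'
  let t2 : Char := if d.getD 'G' 0 > d.getD 'T' 0 then 'G' else 'T'
  if d.getD t1 0 > d.getD t2 0 then t1 else t2

def concensus (strands : List String) : String :=
  let n := (strands.headD "").toList.length   -- len(strands[0]); [] raises in Python (outside Pre_)
  let nuc : List (PySem.Dict Char Int) :=
    (List.range n).foldl (fun nuc i => nuc ++ [pvACount strands i]) []
  String.mk (nuc.foldl (fun s d => s ++ [pvAPick d]) [])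

-- ===== PORT B =====
-- s[i] in 'ACGT'
def pvInACGT (ch : Char) : Bool := (['A', 'C', 'G', 'T'] : List Char).contains ch

-- column = sorted(s[i] for s in strands if s[i] in 'ACGT')
-- ('s[i]' raises IndexError in Python for a too-short strand; excluded by Pre_, skipped here)
def pvColB (strands : List String) (i : Nat) : List Char :=
  PySem.List.sorted ((strands.filterMap (fun s => s.toList[i]?)).filter pvInACGT) (fun x => x) false

-- B's inner loop body on state (best, best_len, prev, run)
def pvScanStep (st : Char × Int × Option Char × Int) (ch : Char) : Char × Int × Option Char × Int :=
  match st with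
  | (best, bestLen, prev, run) =>
    let run' : Int := if some ch = prev then run + 1 else 1
    if bestLen ≤ run' then (ch, run', some ch, run') else (best, bestLen, some ch, run')

-- the run scan over one sorted column, returning best
def pvPickB (col : List Char) : Char :=
  (col.foldl pvScanStep ('T', 0, none, 0)).1

def concensus_alt (strands : List String) : String :=
  let n := (strands.headD "").toList.length   -- len(strands[0]); [] raises in Python (outside Pre_)
  String.mk ((List.range n).foldl (fun out i => out ++ [pvPickB (pvColB strands i)]) [])

-- ===== PRECONDITION & SPEC =====
-- Pre_ excludes exactly the inputs on which the Python A raises IndexError: the empty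
-- list (strands[0]) and lists containing a strand shorter than the first (strand[i]).
-- The Python B raises IndexError on exactly the same inputs.
def Pre_concensus (strands : List String) : Prop :=
  strands ≠ [] ∧ ∀ s ∈ strands, (strands.headD "").toList.length ≤ s.toList.length

instance (strands : List String) : Decidable (Pre_concensus strands) := by
  unfold Pre_concensus; infer_instance

def pvWitness_concensus : List String := ["ATGC", "AACC", "ATCG"]

def Spec_concensus (strands : List String) (out : String) : Prop := out = concensus_alt strands
instance (strands : List String) (out : String) : Decidable (Spec_concensus strands out) := by
  unfold Spec_concensus; infer_instance

-- ===== CLAIM (what is proved, stated in full; the proofs are below) =====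
def Claim_equal_concensus : Prop :=
  ∀ (strands : List String), Dom_concensus strands → Pre_concensus strands →
    Spec_concensus strands (concensus strands)

-- ===== LEMMAS AND PROOFS =====

-- the i-th column: the characters strand[i] of the strands that reach index i
def pvCol (strands : List String) (i : Nat) : List Char :=
  strands.filterMap (fun s => s.toList[i]?)

def pvDmk (a c g t : Int) : PySem.Dict Char Int :=
  PySem.Dict.mk [('A', a), ('C', c), ('G', g), ('T', t)]

theorem pvDmod_A (a c g t : Int) : (pvDmk a c g t).modify 'A' 0 (· + 1) = pvDmk (a + 1) c g t := rfl
theorem pvDmod_C (a c g t : Int) : (pvDmk a c g t).modify 'C' 0 (· + 1) = pvDmk a (c + 1) g t := rfl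
theorem pvDmod_G (a c g t : Int) : (pvDmk a c g t).modify 'G' 0 (· + 1) = pvDmk a c (g + 1) t := rfl
theorem pvDmod_T (a c g t : Int) : (pvDmk a c g t).modify 'T' 0 (· + 1) = pvDmk a c g (t + 1) := rfl

theorem pvAFold (strands : List String) (i : Nat) (a c g t : Int) :
    strands.foldl (pvAStep i) (pvDmk a c g t) =
      pvDmk (a + ((pvCol strands i).count 'A' : Int)) (c + ((pvCol strands i).count 'C' : Int))
            (g + ((pvCol strands i).count 'G' : Int)) (t + ((pvCol strands i).count 'T' : Int)) := by
  induction strands generalizing a c g t with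
  | nil => simp [pvCol]
  | cons s rest ih =>
    simp only [List.foldl_cons]
    rcases h : s.toList[i]? with _ | x
    · rw [show pvAStep i (pvDmk a c g t) s = pvDmk a c g t by simp [pvAStep, h], ih]
      simp [pvCol, h]
    · have hcol : pvCol (s :: rest) i = x :: pvCol rest i := by
        simp [pvCol, h]
      rw [hcol]
      by_cases hA : x = 'A'
      · subst hA
        rw [show pvAStep i (pvDmk a c g t) s = pvDmk (a + 1) c g t by
          simp [pvAStep, h, pvDmod_A], ih]
        simp [pvDmk]; omega
      · by_cases hC : x = 'C'
        · subst hC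
          rw [show pvAStep i (pvDmk a c g t) s = pvDmk a (c + 1) g t by
            simp [pvAStep, h, pvDmod_C], ih]
          simp [pvDmk, hA]; omega
        · by_cases hG : x = 'G'
          · subst hG
            rw [show pvAStep i (pvDmk a c g t) s = pvDmk a c (g + 1) t by
              simp [pvAStep, h, pvDmod_G], ih]
            simp [pvDmk, hA, hC]; omega
          · by_cases hT : x = 'T'
            · subst hT
              rw [show pvAStep i (pvDmk a c g t) s = pvDmk a c g (t + 1) by
                simp [pvAStep, h, pvDmod_T], ih]
              simp [pvDmk, hA, hC, hG]; omega
            · rw [show pvAStep i (pvDmk a c g t) s = pvDmk a c g t by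
                simp [pvAStep, h, hA, hC, hG, hT], ih]
              simp [pvDmk, hA, hC, hG, hT]

-- the sorted, filtered column is the four runs of 'A','C','G','T' in order
theorem pvColB_sorted (l : List Char) :
    PySem.List.sorted (l.filter pvInACGT) (fun x => x) false =
      List.replicate (l.count 'A') 'A' ++ List.replicate (l.count 'C') 'C' ++
      List.replicate (l.count 'G') 'G' ++ List.replicate (l.count 'T') 'T' := by
  apply PySem.List.sorted_id_eq_of_perm_of_pairwise
  · rw [List.perm_iff_count]
    intro x
    simp only [List.count_append, List.count_replicate]
    by_cases hx : pvInACGT x = true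
    · rw [List.count_filter hx]
      simp only [pvInACGT, List.contains_eq_mem, decide_eq_true_eq] at hx
      fin_cases hx <;> simp
    · have hnm : x ∉ l.filter pvInACGT := by
        intro hmem
        exact hx (List.of_mem_filter hmem)
      rw [List.count_eq_zero_of_not_mem hnm]
      simp only [pvInACGT, List.contains_eq_mem, decide_eq_true_eq] at hx
      have h1 : ('A' == x) = false := by simp; intro h; exact hx (by simp [← h])
      have h2 : ('C' == x) = false := by simp; intro h; exact hx (by simp [← h])
      have h3 : ('G' == x) = false := by simp; intro h; exact hx (by simp [← h])
      have h4 : ('T' == x) = false := by simp; intro h; exact hx (by simp [← h])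
      simp [h1, h2, h3, h4]
  · have hrep : ∀ (n : Nat) (c : Char), List.Pairwise (fun x1 x2 : Char => x1 ≤ x2) (List.replicate n c) :=
      fun n c => List.pairwise_replicate.mpr (Or.inr le_rfl)
    refine List.pairwise_append.mpr ⟨?_, hrep _ _, ?_⟩
    · refine List.pairwise_append.mpr ⟨?_, hrep _ _, ?_⟩
      · refine List.pairwise_append.mpr ⟨hrep _ _, hrep _ _, ?_⟩
        intro x hx y hy
        rw [List.eq_of_mem_replicate hx, List.eq_of_mem_replicate hy]; decide
      · intro x hx y hy
        rw [List.eq_of_mem_replicate hy]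
        rcases List.mem_append.mp hx with h | h <;>
          rw [List.eq_of_mem_replicate h] <;> decide
    · intro x hx y hy
      rw [List.eq_of_mem_replicate hy]
      rcases List.mem_append.mp hx with h | h
      · rcases List.mem_append.mp h with h' | h' <;>
          rw [List.eq_of_mem_replicate h'] <;> decide
      · rw [List.eq_of_mem_replicate h]; decide

-- scanning a run of ch while already inside a run of ch of length r
theorem pvScanRepCont (n : Nat) (ch best : Char) (b r : Int) :
    (List.replicate n ch).foldl pvScanStep (best, b, some ch, r) =
      if n = 0 then (best, b, some ch, r)
      else if b ≤ r + n then (ch, r + n, some ch, r + n)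
      else (best, b, some ch, r + n) := by
  induction n generalizing best b r with
  | zero => simp
  | succ n ih =>
    rw [List.replicate_succ, List.foldl_cons]
    have hstep : pvScanStep (best, b, some ch, r) ch =
        if b ≤ r + 1 then (ch, r + 1, some ch, r + 1) else (best, b, some ch, r + 1) := by
      simp [pvScanStep]
    rw [hstep]
    by_cases hb : b ≤ r + 1
    · rw [if_pos hb, ih]
      split_ifs <;> simp_all [Prod.mk.injEq] <;> omega
    · rw [if_neg hb, ih]
      split_ifs <;> simp_all [Prod.mk.injEq] <;> omega

-- scanning a fresh run of ch (prev ≠ ch)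
theorem pvScanRep (n : Nat) (ch best : Char) (b : Int) (prev : Option Char) (r : Int)
    (hprev : prev ≠ some ch) :
    (List.replicate n ch).foldl pvScanStep (best, b, prev, r) =
      if n = 0 then (best, b, prev, r)
      else if b ≤ n then (ch, n, some ch, n)
      else (best, b, some ch, n) := by
  rcases Nat.eq_zero_or_pos n with hn | hn
  · subst hn; simp
  · obtain ⟨m, rfl⟩ := Nat.exists_eq_succ_of_ne_zero (Nat.pos_iff_ne_zero.mp hn)
    rw [List.replicate_succ, List.foldl_cons]
    have hsc : some ch ≠ prev := fun h => hprev h.symm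
    have hstep : pvScanStep (best, b, prev, r) ch =
        if b ≤ 1 then (ch, 1, some ch, 1) else (best, b, some ch, 1) := by
      simp [pvScanStep, if_neg hsc]
    rw [hstep]
    by_cases hb : b ≤ 1
    · rw [if_pos hb, pvScanRepCont]
      split_ifs <;> simp_all [Prod.mk.injEq] <;> omega
    · rw [if_neg hb, pvScanRepCont]
      split_ifs <;> simp_all [Prod.mk.injEq] <;> omega

-- A's tournament written out as nested ifs on the four counts
theorem pvAPick_ifs (a c g t : Int) :
    pvAPick (pvDmk a c g t) =
      if (if a > c then a else c) > (if g > t then g else t)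
      then (if a > c then 'A' else 'C') else (if g > t then 'G' else 'T') := by
  simp only [pvAPick, pvDmk, PySem.Dict.getD, PySem.Dict.get?]
  split_ifs <;> simp_all

-- the run scan over the four runs picks exactly A's tournament winner
theorem pvPickB_eq (a c g t : Nat) :
    pvPickB (List.replicate a 'A' ++ List.replicate c 'C' ++
             List.replicate g 'G' ++ List.replicate t 'T') =
      pvAPick (pvDmk (a : Int) (c : Int) (g : Int) (t : Int)) := by
  unfold pvPickB
  rw [List.foldl_append, List.foldl_append, List.foldl_append, pvAPick_ifs,
      pvScanRep a 'A' 'T' 0 none 0 (by decide)]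
  split_ifs <;>
    rw [pvScanRep c 'C' _ _ _ _ (by decide)] <;>
    split_ifs <;>
    rw [pvScanRep g 'G' _ _ _ _ (by decide)] <;>
    split_ifs <;>
    rw [pvScanRep t 'T' _ _ _ _ (by decide)] <;>
    split_ifs <;>
    first | rfl | (exfalso; omega)

-- ===== VERDICT (by name: the statement is the Claim_ definition above) =====
theorem concensus_spec : Claim_equal_concensus := by
  intro strands _ _
  unfold Spec_concensus concensus concensus_alt
  dsimp only
  rw [PySem.List.foldl_append_singleton_eq_map, List.nil_append,
      PySem.List.foldl_append_singleton_eq_map, List.nil_append,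
      PySem.List.foldl_append_singleton_eq_map, List.nil_append,
      List.map_map]
  congr 1
  apply List.map_congr_left
  intro i _
  simp only [Function.comp_apply]
  have hA := pvAFold strands i 0 0 0 0
  unfold pvDmk at hA
  rw [pvACount, hA]
  have hcol : pvColB strands i =
      List.replicate ((pvCol strands i).count 'A') 'A' ++
      List.replicate ((pvCol strands i).count 'C') 'C' ++
      List.replicate ((pvCol strands i).count 'G') 'G' ++
      List.replicate ((pvCol strands i).count 'T') 'T' := by
    unfold pvColB pvCol
    exact pvColB_sorted _
  rw [hcol, pvPickB_eq]
  simp only [pvDmk, zero_add]
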